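-- pv_equiv track=rewrite | github.com/welli7ngton/Python | Funções/Recursividade/exercicio23.py | temPrimoQ
-- ===== SOURCE A (Python) =====
-- def temPrimoQ(w):
--     def primo(num):
--         if num < 2:
--             return False
--         for i in range(2, int(num**0.5) + 1):
--             if num % i == 0:
--                 return False
--         return True
--
--     if len(w) == 0:
--         return False
--
--     sublist = w[0]
--     for num in sublist:
--         if primo(num):
--             return True
--
--     return temPrimoQ(w[1:])
-- ===== SOURCE B (Python) =====
-- def temPrimoQ(w):
--     def primo(num):
--         if num < 2:
--             return False
--         i = 2
--         while i * i <= num: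
--             if num % i == 0:
--                 return False
--             i += 1
--         return True
--
--     return any(primo(n) for sub in w for n in sub)
-- ===== Notes on version B (the rewrite author's own statement) =====
-- stated objective: simpler
-- what changed: Replaces A's recursion over the list tail plus an explicit per-sublist loop with a single flat short-circuiting any() over all numbers, and replaces the float-sqrt-bounded range loop in the primality test with an i*i <= num while loop.
import Mathlib
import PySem

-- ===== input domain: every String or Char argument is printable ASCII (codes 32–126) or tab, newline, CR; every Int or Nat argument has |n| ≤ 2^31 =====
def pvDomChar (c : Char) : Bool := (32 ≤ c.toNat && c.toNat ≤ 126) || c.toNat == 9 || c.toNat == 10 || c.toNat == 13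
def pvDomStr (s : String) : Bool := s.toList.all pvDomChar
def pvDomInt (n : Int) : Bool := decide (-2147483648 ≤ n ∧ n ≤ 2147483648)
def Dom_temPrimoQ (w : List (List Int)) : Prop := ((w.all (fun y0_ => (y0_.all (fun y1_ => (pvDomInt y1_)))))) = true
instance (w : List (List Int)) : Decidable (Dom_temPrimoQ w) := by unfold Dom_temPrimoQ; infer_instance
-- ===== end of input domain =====

-- B replaces A's recursion-over-tail plus per-sublist loop by one flat short-circuiting
-- any over all numbers, and the float-sqrt-bounded trial division by an i*i <= num loop
-- (objective: simpler).


-- ===== PORT A =====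
-- int(num**0.5): exact integer sqrt; exact vs CPython's float pow on the stated domain
-- (2 ≤ num ≤ 2^31, where the correctly rounded double sqrt truncates to floor(sqrt num)).
def pvIsqrtA (num : Int) : Int := (Nat.sqrt num.toNat : Int)

-- the 'for i in range(...): if num % i == 0: return False' loop with early return
def pvLoopA (num : Int) : List Int → Bool
  | [] => true
  | i :: rest => if PySem.Int.mod num i == 0 then false else pvLoopA num rest

def pvPrimoA (num : Int) : Bool :=
  if num < 2 then false
  else pvLoopA num (PySem.List.pyRange 2 (pvIsqrtA num + 1) 1)

-- the 'for num in sublist: if primo(num): return True' loop with early return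
def pvScanA (num : List Int) : Bool :=
  match num with
  | [] => false
  | n :: t => if pvPrimoA n then true else pvScanA t

-- len(w)==0 guard / w[0] / recursion on w[1:] become the structural match on the list
def temPrimoQ (w : List (List Int)) : Bool :=
  match w with
  | [] => false
  | sublist :: rest => if pvScanA sublist then true else temPrimoQ rest

-- ===== PORT B =====
-- the 'while i * i <= num' trial-division loop
def pvWhileB (num i : Int) : Bool :=
  if i * i ≤ num then
    (if PySem.Int.mod num i == 0 then false else pvWhileB num (i + 1))
  else true
termination_by (num + 1 - i).toNat
decreasing_by
  rename_i _h
  have : 0 < num + 1 - i := by nlinarith [sq_nonneg (i - 1), sq_nonneg i]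
  omega

def pvPrimoB (num : Int) : Bool :=
  if num < 2 then false else pvWhileB num 2

-- any(primo(n) for sub in w for n in sub)
def temPrimoQ_alt (w : List (List Int)) : Bool :=
  w.any (fun sub => sub.any pvPrimoB)

-- ===== PRECONDITION & SPEC =====
def Spec_temPrimoQ (w : List (List Int)) (out : Bool) : Prop := out = temPrimoQ_alt w
instance (w : List (List Int)) (out : Bool) : Decidable (Spec_temPrimoQ w out) := by unfold Spec_temPrimoQ; infer_instance

-- ===== CLAIM (what is proved, stated in full; the proofs are below) =====
def Claim_equal_temPrimoQ : Prop := ∀ (w : List (List Int)), Dom_temPrimoQ w → Spec_temPrimoQ w (temPrimoQ w)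

-- ===== LEMMAS AND PROOFS =====

lemma pvLoopA_eq_all (num : Int) (l : List Int) :
    pvLoopA num l = l.all (fun i => !(PySem.Int.mod num i == 0)) := by
  induction l with
  | nil => rfl
  | cons i rest ih =>
    simp only [pvLoopA, List.all_cons, ih]
    split_ifs with h <;> simp [h]

lemma pvWhileB_true_iff (num : Int) : ∀ i : Int, 0 ≤ i →
    (pvWhileB num i = true ↔ ∀ j : Int, i ≤ j → j * j ≤ num → PySem.Int.mod num j ≠ 0) := by
  intro i
  induction i using pvWhileB.induct (num := num) with
  | case1 i h hm =>
    intro hi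
    -- i*i ≤ num, mod = 0 : loop returns false, and j = i violates the RHS
    rw [pvWhileB]
    simp only [if_pos h, if_pos hm]
    simp only [beq_iff_eq] at hm
    constructor
    · intro h'; cases h'
    · intro hall; exact absurd hm (hall i le_rfl h)
  | case2 i h hm ih =>
    intro hi
    rw [pvWhileB]
    simp only [if_pos h, if_neg hm]
    have ih' := ih (by omega)
    simp only [beq_iff_eq] at hm
    rw [ih']
    constructor
    · intro hall j hij hjj
      rcases eq_or_lt_of_le hij with rfl | hlt
      · exact hm
      · exact hall j (by omega) hjj
    · intro hall j hij hjj; exact hall j (by omega) hjj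
  | case3 i h =>
    intro hi
    rw [pvWhileB]
    simp only [if_neg h]
    constructor
    · intro _ j hij hjj
      exfalso
      have : i * i ≤ j * j := by nlinarith
      omega
    · intro _; trivial

lemma sq_le_iff_le_isqrt (num j : Int) (h2 : 2 ≤ num) (hj : 0 ≤ j) :
    j * j ≤ num ↔ j ≤ pvIsqrtA num := by
  unfold pvIsqrtA
  obtain ⟨n, rfl⟩ : ∃ n : Nat, num = (n : Int) := ⟨num.toNat, by omega⟩
  obtain ⟨m, rfl⟩ : ∃ m : Nat, j = (m : Int) := ⟨j.toNat, by omega⟩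
  rw [Int.toNat_natCast]
  constructor
  · intro h
    have : m * m ≤ n := by exact_mod_cast h
    exact_mod_cast Nat.le_sqrt.mpr this
  · intro h
    have : m ≤ Nat.sqrt n := by exact_mod_cast h
    exact_mod_cast Nat.le_sqrt.mp this

lemma primo_eq (num : Int) : pvPrimoA num = pvPrimoB num := by
  unfold pvPrimoA pvPrimoB
  split_ifs with h
  · rfl
  · push Not at h
    rw [Bool.eq_iff_iff, pvWhileB_true_iff num 2 (by omega), pvLoopA_eq_all,
      List.all_eq_true]
    constructor
    · intro hall j h2j hjj
      have hmem : j ∈ PySem.List.pyRange 2 (pvIsqrtA num + 1) 1 := by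
        rw [PySem.List.mem_pyRange_one]
        have := (sq_le_iff_le_isqrt num j h (by omega)).mp hjj
        omega
      have := hall j hmem
      simpa using this
    · intro hall j hmem
      rw [PySem.List.mem_pyRange_one] at hmem
      have hjj : j * j ≤ num := (sq_le_iff_le_isqrt num j h (by omega)).mpr (by omega)
      have := hall j (by omega) hjj
      simpa using this

lemma scanA_eq_any (l : List Int) : pvScanA l = l.any pvPrimoB := by
  induction l with
  | nil => rfl
  | cons n t ih =>
    simp only [pvScanA, List.any_cons, ih, primo_eq n]
    cases pvPrimoB n <;> simp

lemma temPrimoQ_eq (w : List (List Int)) : temPrimoQ w = temPrimoQ_alt w := by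
  unfold temPrimoQ_alt
  induction w with
  | nil => rfl
  | cons sub rest ih =>
    simp only [temPrimoQ, List.any_cons, scanA_eq_any, ih]
    split_ifs with h <;> simp [h]

-- ===== VERDICT (by name: the statement is the Claim_ definition above) =====
theorem temPrimoQ_spec : Claim_equal_temPrimoQ := by
  intro w _
  exact temPrimoQ_eq w
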